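-- pv_equiv track=rewrite | github.com/early-yoga-class/algorithm-study | programmers/지게차와크레인/ch.py | solution
-- ===== SOURCE A (Python) =====
-- from collections import deque
--
-- def solution(storage, requests):
--     answer = 0
--     # 4면중 적어도 1면이 창고 외부 연결
--
--     # request = crane
--     # 길이 1이면 지게차, 2이면 크레인
--     # 2 <= n, m <= 50
--     # 50 * 50 == 2500
--     n = len(storage)
--     m = len(storage[0])
--
--     for i in range(n):
--         storage[i] = list(ch for ch in storage[i])
--
--     def bfs(x, y):
--         queue = deque()
--         visited = [[False] * m for _ in range(n)]
--         visited[x][y] = True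
--         queue.append((x, y))
--         while queue:
--             curX, curY = queue.popleft()
--             if curX < 0 or curY < 0 or curX >= n or curY >= m:
--                 return True
--             for dx, dy in [(0, 1), (0, -1), (1, 0), (-1, 0)]:
--                 nx = dx + curX
--                 ny = dy + curY
--                 if nx < 0 or ny < 0 or nx >= n or ny >= m:
--                     return True
--                 if visited[nx][ny] : continue
--
--                 if storage[nx][ny] == 'e':
--                     queue.append((nx, ny))
--                     visited[nx][ny] = True
--
--         return False
--
--     for request in requests:
--         checkQueue = deque()
--         # crane
--         if len(request) == 2:
--             for i in range(n):
--                 for j in range(m):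
--                     if storage[i][j] == 'e': continue
--                     if request[0] == storage[i][j]:
--                         storage[i][j] = 'e'
--                         answer += 1
--         # 지게차
--         else:
--             for i in range(n):
--                 for j in range(m):
--                     if storage[i][j] == 'e': continue
--                     if request[0] == storage[i][j]:
--                         if bfs(i, j):
--                             checkQueue.append((i, j))
--
--         for x, y in checkQueue:
--             storage[x][y] = 'e'
--             answer += 1
--
--
--     return n * m - answer
-- ===== SOURCE B (Python) =====
-- # B: one exterior flood (sweep-to-fixpoint) per forklift request instead of a per-item BFS.
-- # Note: A mutates its `storage` argument in place; B does not — the equivalence is about the return value.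
-- def solution(storage, requests):
--     n = len(storage)
--     m = len(storage[0])
--     grid = [list(row) for row in storage]
--     removed_total = 0
--     for req in requests:
--         t = req[0]
--         if len(req) == 2:
--             removed = [(i, j) for i in range(n) for j in range(m)
--                        if grid[i][j] == t and t != 'e']
--         else:
--             # 'open_' = empty cells connected to the outside, computed by
--             # sweeping the grid to a fixpoint (monotone closure).
--             open_ = set()
--             while True:
--                 new = {(i, j) for i in range(n) for j in range(m)
--                        if grid[i][j] == 'e'
--                        and (i == 0 or j == 0 or i == n - 1 or j == m - 1
--                             or (i - 1, j) in open_ or (i + 1, j) in open_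
--                             or (i, j - 1) in open_ or (i, j + 1) in open_)}
--                 if new == open_:
--                     break
--                 open_ = new
--             removed = [(i, j) for i in range(n) for j in range(m)
--                        if grid[i][j] == t and t != 'e'
--                        and (i == 0 or j == 0 or i == n - 1 or j == m - 1
--                             or (i - 1, j) in open_ or (i + 1, j) in open_
--                             or (i, j - 1) in open_ or (i, j + 1) in open_)]
--         for (i, j) in removed:
--             grid[i][j] = 'e'
--         removed_total += len(removed)
--     return n * m - removed_total
-- ===== Notes on version B (the rewrite author's own statement) =====
-- stated objective: alternative
-- what changed: Per forklift request, B computes the set of outside-connected empty cells once as a monotone fixpoint (repeated whole-grid sweeps) and removes every boundary-accessible matching item against it, instead of A's per-item BFS to the boundary; crane removals become a filter-then-apply pass; B does not mutate the storage argument (A does). Pre_ excludes empty storage and (when there is at least one request) rows shorter than the first row (A raises IndexError there) and empty request strings, on which A raises IndexError as soon as it scans a non-empty cell and B always raises.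
-- outside the precondition, e.g. on solution(['e'], ['']): A returns 1, B raises IndexError
import Mathlib
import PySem

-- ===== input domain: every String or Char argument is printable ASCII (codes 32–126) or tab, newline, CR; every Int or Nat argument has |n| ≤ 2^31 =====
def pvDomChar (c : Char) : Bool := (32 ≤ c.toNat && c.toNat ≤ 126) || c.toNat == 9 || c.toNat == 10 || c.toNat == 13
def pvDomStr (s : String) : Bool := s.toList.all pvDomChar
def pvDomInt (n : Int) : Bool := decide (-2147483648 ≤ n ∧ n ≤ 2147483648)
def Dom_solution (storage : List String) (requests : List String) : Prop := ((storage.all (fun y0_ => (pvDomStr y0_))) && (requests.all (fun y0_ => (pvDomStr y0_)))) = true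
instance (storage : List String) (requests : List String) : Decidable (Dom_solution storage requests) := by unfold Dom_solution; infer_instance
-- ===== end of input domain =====

-- B replaces A's per-item BFS by one exterior-connectivity fixpoint per forklift request
-- (alternative algorithm, similar cost); A mutates its `storage` argument in place, B does not —
-- the equivalence proved here is about the return value.

-- ===== PORT A =====
-- storage[i][j] (read with Python indexing; both ports only read it at guarded indices)
def cellGet (g : List (List Char)) (i j : Int) : Char :=
  (PySem.List.pyGet? ((PySem.List.pyGet? g i).getD []) j).getD ' '

-- storage[i][j] = c (both ports only write at guarded in-range indices)
def cellSet (g : List (List Char)) (i j : Int) (c : Char) : List (List Char) :=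
  g.modify i.toNat (fun row => row.set j.toNat c)

-- the nested 'for i in range(n): for j in range(m):' traversal, flattened
def cells (n m : Int) : List (Int × Int) :=
  (PySem.List.pyRange 0 n 1).flatMap (fun i => (PySem.List.pyRange 0 m 1).map (fun j => (i, j)))

def dirList : List (Int × Int) := [(0, 1), (0, -1), (1, 0), (-1, 0)]

-- the body of A's 'for dx, dy in [...]' over the remaining directions:
-- none = Python's 'return True' fired on an out-of-range neighbour
def bfsInner (g : List (List Char)) (n m : Int) (cur : Int × Int) :
    List (Int × Int) → List (Int × Int) → List (Int × Int) →
    Option (List (Int × Int) × List (Int × Int))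
  | [], vis, q => some (vis, q)
  | d :: rest, vis, q =>
    let nx := d.1 + cur.1
    let ny := d.2 + cur.2
    if nx < 0 ∨ ny < 0 ∨ n ≤ nx ∨ m ≤ ny then none
    else if (nx, ny) ∈ vis then bfsInner g n m cur rest vis q
    else if cellGet g nx ny = 'e' then bfsInner g n m cur rest ((nx, ny) :: vis) (q ++ [(nx, ny)])
    else bfsInner g n m cur rest vis q

-- A's 'while queue:' loop; the fuel n*m+1 is a totalisation bound only (proved sufficient below);
-- visited is represented as the list of coordinates marked True
def bfsLoop (g : List (List Char)) (n m : Int) :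
    Nat → List (Int × Int) → List (Int × Int) → Bool
  | 0, _, _ => false
  | _ + 1, _, [] => false
  | fuel + 1, vis, cur :: rest =>
    if cur.1 < 0 ∨ cur.2 < 0 ∨ n ≤ cur.1 ∨ m ≤ cur.2 then true
    else
      match bfsInner g n m cur dirList vis rest with
      | none => true
      | some (v, q) => bfsLoop g n m fuel v q

def bfs (g : List (List Char)) (n m x y : Int) : Bool :=
  bfsLoop g n m (n.toNat * m.toNat + 1) [(x, y)] [(x, y)]

-- crane branch body: in-place removal while scanning
def craneStep (t : Char) (s : List (List Char) × Int) (c : Int × Int) : List (List Char) × Int :=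
  if cellGet s.1 c.1 c.2 = 'e' then s
  else if t = cellGet s.1 c.1 c.2 then (cellSet s.1 c.1 c.2 'e', s.2 + 1)
  else s

-- forklift branch: collect checkQueue
def forkCollect (g : List (List Char)) (n m : Int) (t : Char) : List (Int × Int) :=
  (cells n m).foldl (fun acc c =>
    if cellGet g c.1 c.2 = 'e' then acc
    else if t = cellGet g c.1 c.2 then
      (if bfs g n m c.1 c.2 then acc ++ [c] else acc)
    else acc) []

def reqStepA (n m : Int) (s : List (List Char) × Int) (r : String) : List (List Char) × Int :=
  let t := (PySem.Str.pyGet? r 0).getD ' '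
  if PySem.Str.len r = 2 then (cells n m).foldl (craneStep t) s
  else (forkCollect s.1 n m t).foldl (fun s c => (cellSet s.1 c.1 c.2 'e', s.2 + 1)) s

def solution (storage : List String) (requests : List String) : Int :=
  let n : Int := PySem.List.len storage
  let m : Int := PySem.Str.len ((PySem.List.pyGet? storage 0).getD "")
  let g : List (List Char) := storage.map String.toList
  let res := requests.foldl (reqStepA n m) (g, 0)
  n * m - res.2

-- ===== PORT B =====
-- Source B's accessibility test: on the border, or next to an already-open cell
def onBoundaryOrOpen (n m : Int) (op : List (Int × Int)) (i j : Int) : Bool :=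
  decide (i = 0 ∨ j = 0 ∨ i = n - 1 ∨ j = m - 1 ∨
    (i - 1, j) ∈ op ∨ (i + 1, j) ∈ op ∨ (i, j - 1) ∈ op ∨ (i, j + 1) ∈ op)

-- one whole-grid sweep: the new 'open' set (a Python set of pairs, as its sorted-by-scan list)
def sweep (g : List (List Char)) (n m : Int) (op : List (Int × Int)) : List (Int × Int) :=
  (cells n m).filter (fun c => cellGet g c.1 c.2 == 'e' && onBoundaryOrOpen n m op c.1 c.2)

-- Source B's 'while True' sweep-to-fixpoint; fuel is a totalisation bound only (proved sufficient below)
def fixLoop (g : List (List Char)) (n m : Int) : Nat → List (Int × Int) → List (Int × Int)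
  | 0, op => op
  | fuel + 1, op =>
    let nw := sweep g n m op
    if nw = op then op else fixLoop g n m fuel nw

def reqStepB (n m : Int) (s : List (List Char) × Int) (r : String) : List (List Char) × Int :=
  let t := (PySem.Str.pyGet? r 0).getD ' '
  let removed :=
    if PySem.Str.len r = 2 then
      (cells n m).filter (fun c => cellGet s.1 c.1 c.2 == t && t != 'e')
    else
      let op := fixLoop s.1 n m (n.toNat * m.toNat + 2) []
      (cells n m).filter (fun c =>
        cellGet s.1 c.1 c.2 == t && t != 'e' && onBoundaryOrOpen n m op c.1 c.2)
  (removed.foldl (fun h c => cellSet h c.1 c.2 'e') s.1, s.2 + removed.length)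

def solution_alt (storage : List String) (requests : List String) : Int :=
  let n : Int := PySem.List.len storage
  let m : Int := PySem.Str.len ((PySem.List.pyGet? storage 0).getD "")
  let g : List (List Char) := storage.map String.toList
  let res := requests.foldl (reqStepB n m) (g, 0)
  n * m - res.2

-- ===== PRECONDITION & SPEC =====
-- Pre_ excludes empty storage and, when there is at least one request, rows shorter than the
-- first row (A raises IndexError there), and empty request strings, on which A raises
-- IndexError as soon as it scans a non-empty cell.
def Pre_solution (storage : List String) (requests : List String) : Prop :=
  storage ≠ [] ∧
    (requests ≠ [] → ∀ s ∈ storage, (storage.headD "").toList.length ≤ s.toList.length) ∧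
    (∀ r ∈ requests, r ≠ "")
instance (storage : List String) (requests : List String) : Decidable (Pre_solution storage requests) := by
  unfold Pre_solution; infer_instance

def pvWitness_solution : List String × List String := (["Ae", "ee"], ["A"])

def Spec_solution (storage : List String) (requests : List String) (out : Int) : Prop := out = solution_alt storage requests
instance (storage : List String) (requests : List String) (out : Int) : Decidable (Spec_solution storage requests out) := by unfold Spec_solution; infer_instance

-- ===== CLAIM (what is proved, stated in full; the proofs are below) =====
def Claim_equal_solution : Prop := ∀ (storage : List String) (requests : List String), Dom_solution storage requests → Pre_solution storage requests → Spec_solution storage requests (solution storage requests)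

-- ===== LEMMAS AND PROOFS =====

-- in-bounds / boundary / adjacency, and the reachability relations the two ports compute
def inB (n m : Int) (c : Int × Int) : Prop := 0 ≤ c.1 ∧ c.1 < n ∧ 0 ≤ c.2 ∧ c.2 < m

def onB (n m : Int) (c : Int × Int) : Prop := c.1 = 0 ∨ c.2 = 0 ∨ c.1 = n - 1 ∨ c.2 = m - 1

def adjc (c d : Int × Int) : Prop :=
  d = (c.1 - 1, c.2) ∨ d = (c.1 + 1, c.2) ∨ d = (c.1, c.2 - 1) ∨ d = (c.1, c.2 + 1)

-- 'e'-cells connected to the outside through 'e'-cells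
inductive EReach (g : List (List Char)) (n m : Int) : Int × Int → Prop
  | boundary (c : Int × Int) : inB n m c → cellGet g c.1 c.2 = 'e' → onB n m c → EReach g n m c
  | step (c d : Int × Int) : inB n m c → cellGet g c.1 c.2 = 'e' → adjc c d → EReach g n m d →
      EReach g n m c

-- cells A's BFS can enqueue starting from s
inductive Conn (g : List (List Char)) (n m : Int) (s : Int × Int) : Int × Int → Prop
  | base : Conn g n m s s
  | step (c d : Int × Int) : Conn g n m s c → adjc c d → inB n m d → cellGet g d.1 d.2 = 'e' →
      Conn g n m s d

-- what A's bfs decides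
def ReachB (g : List (List Char)) (n m : Int) (s : Int × Int) : Prop :=
  onB n m s ∨ ∃ d, adjc s d ∧ inB n m d ∧ cellGet g d.1 d.2 = 'e' ∧ EReach g n m d

def iterF (g : List (List Char)) (n m : Int) : Nat → List (Int × Int)
  | 0 => []
  | k + 1 => sweep g n m (iterF g n m k)

lemma mem_cells (n m : Int) (c : Int × Int) : c ∈ cells n m ↔ inB n m c := by
  simp [cells, List.mem_flatMap, PySem.List.mem_pyRange_one, inB]
  constructor
  · rintro ⟨i, ⟨h1, h2⟩, j, ⟨h3, h4⟩, rfl⟩; exact ⟨h1, h2, h3, h4⟩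
  · rintro ⟨h1, h2, h3, h4⟩; exact ⟨c.1, ⟨h1, h2⟩, c.2, ⟨h3, h4⟩, rfl⟩

lemma nodup_cells (n m : Int) : (cells n m).Nodup := by
  unfold cells
  rw [List.nodup_flatMap]
  constructor
  · intro i _
    exact (PySem.List.nodup_pyRange_one 0 m).map (fun a b h => by simpa using h)
  · refine (PySem.List.nodup_pyRange_one 0 n).imp ?_
    intro a b hab x hxa hxb
    simp only [List.mem_map] at hxa hxb
    obtain ⟨j, _, rfl⟩ := hxa
    obtain ⟨j', _, h⟩ := hxb
    exact hab (by simpa using congrArg Prod.fst h.symm)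

lemma length_cells (n m : Int) : (cells n m).length = n.toNat * m.toNat := by
  unfold cells
  rw [List.length_flatMap,
    List.map_congr_left (g := fun _ => m.toNat)
      (fun i _ => by simp [PySem.List.length_pyRange_one]),
    List.map_const', List.sum_replicate, smul_eq_mul, PySem.List.length_pyRange_one]
  simp

lemma nodup_inB_length_le (n m : Int) (l : List (Int × Int)) (hnd : l.Nodup)
    (hb : ∀ c ∈ l, inB n m c) : l.length ≤ n.toNat * m.toNat := by
  have h := (hnd.subperm (l₂ := cells n m) ?_).length_le
  · simpa [length_cells] using h
  · intro c hc; exact (mem_cells n m c).2 (hb c hc)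
lemma cellGet_cellSet_ne (g : List (List Char)) (a b : Int × Int) (x : Char)
    (ha : 0 ≤ a.1 ∧ 0 ≤ a.2) (hb : 0 ≤ b.1 ∧ 0 ≤ b.2) (hne : a ≠ b) :
    cellGet (cellSet g a.1 a.2 x) b.1 b.2 = cellGet g b.1 b.2 := by
  obtain ⟨a1, a2⟩ := a
  obtain ⟨b1, b2⟩ := b
  simp only at ha hb ⊢
  unfold cellGet cellSet
  rw [PySem.List.pyGet?_of_nonneg _ hb.1, PySem.List.pyGet?_of_nonneg _ hb.1]
  by_cases hij : a1 = b1
  · subst hij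
    have hj : a2.toNat ≠ b2.toNat := fun h => hne (by simp; omega)
    rw [List.getElem?_modify]
    cases hrow : g[a1.toNat]? with
    | none => simp
    | some row =>
      simp only [Option.map_eq_map, Option.map_some, Option.getD_some, if_true]
      rw [PySem.List.pyGet?_of_nonneg _ hb.2, PySem.List.pyGet?_of_nonneg _ hb.2,
        List.getElem?_set_ne hj]
  · have : a1.toNat ≠ b1.toNat := fun h => hij (by omega)
    rw [List.getElem?_modify_ne _ _ this]
lemma mem_sweep (g : List (List Char)) (n m : Int) (op : List (Int × Int)) (c : Int × Int) :
    c ∈ sweep g n m op ↔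
      inB n m c ∧ cellGet g c.1 c.2 = 'e' ∧ (onB n m c ∨ ∃ d, adjc c d ∧ d ∈ op) := by
  unfold sweep onBoundaryOrOpen
  rw [List.mem_filter]
  simp only [mem_cells, Bool.and_eq_true, beq_iff_eq, decide_eq_true_eq, onB]
  constructor
  · rintro ⟨h1, h2, h3⟩
    refine ⟨h1, h2, ?_⟩
    rcases h3 with h | h | h | h | h | h | h | h
    · exact Or.inl (Or.inl h)
    · exact Or.inl (Or.inr (Or.inl h))
    · exact Or.inl (Or.inr (Or.inr (Or.inl h)))
    · exact Or.inl (Or.inr (Or.inr (Or.inr h)))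
    · exact Or.inr ⟨_, Or.inl rfl, h⟩
    · exact Or.inr ⟨_, Or.inr (Or.inl rfl), h⟩
    · exact Or.inr ⟨_, Or.inr (Or.inr (Or.inl rfl)), h⟩
    · exact Or.inr ⟨_, Or.inr (Or.inr (Or.inr rfl)), h⟩
  · rintro ⟨h1, h2, h3⟩
    refine ⟨h1, h2, ?_⟩
    rcases h3 with (h | h | h | h) | ⟨d, hadj, hmem⟩
    · exact Or.inl h
    · exact Or.inr (Or.inl h)
    · exact Or.inr (Or.inr (Or.inl h))
    · exact Or.inr (Or.inr (Or.inr (Or.inl h)))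
    · rcases hadj with rfl | rfl | rfl | rfl
      · exact Or.inr (Or.inr (Or.inr (Or.inr (Or.inl hmem))))
      · exact Or.inr (Or.inr (Or.inr (Or.inr (Or.inr (Or.inl hmem)))))
      · exact Or.inr (Or.inr (Or.inr (Or.inr (Or.inr (Or.inr (Or.inl hmem))))))
      · exact Or.inr (Or.inr (Or.inr (Or.inr (Or.inr (Or.inr (Or.inr hmem))))))

lemma sweep_mono (g : List (List Char)) (n m : Int) (op op' : List (Int × Int))
    (h : ∀ x ∈ op, x ∈ op') : ∀ x ∈ sweep g n m op, x ∈ sweep g n m op' := by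
  intro x hx
  rw [mem_sweep] at hx ⊢
  refine ⟨hx.1, hx.2.1, ?_⟩
  rcases hx.2.2 with hb | ⟨d, hadj, hd⟩
  · exact Or.inl hb
  · exact Or.inr ⟨d, hadj, h d hd⟩

lemma iter_subset_succ (g : List (List Char)) (n m : Int) :
    ∀ (k : Nat), ∀ x ∈ iterF g n m k, x ∈ iterF g n m (k + 1) := by
  intro k
  induction k with
  | zero => intro x hx; simp [iterF] at hx
  | succ k ih => exact sweep_mono g n m _ _ ih

lemma iter_mono (g : List (List Char)) (n m : Int) {j k : Nat} (h : j ≤ k) :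
    ∀ x ∈ iterF g n m j, x ∈ iterF g n m k := by
  induction k with
  | zero => intro x hx; interval_cases j; exact hx
  | succ k ih =>
    rcases Nat.lt_or_ge j (k+1) with hl | hg
    · intro x hx; exact iter_subset_succ g n m k x (ih (by omega) x hx)
    · have : j = k + 1 := by omega
      subst this; exact fun x hx => hx

lemma iter_nodup (g : List (List Char)) (n m : Int) (k : Nat) : (iterF g n m k).Nodup := by
  cases k with
  | zero => simp [iterF]
  | succ k => exact (nodup_cells n m).filter _

lemma iter_sound (g : List (List Char)) (n m : Int) :
    ∀ (k : Nat), ∀ c ∈ iterF g n m k, EReach g n m c := by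
  intro k
  induction k with
  | zero => intro c hc; simp [iterF] at hc
  | succ k ih =>
    intro c hc
    rw [show iterF g n m (k+1) = sweep g n m (iterF g n m k) from rfl, mem_sweep] at hc
    obtain ⟨h1, h2, h3⟩ := hc
    rcases h3 with hb | ⟨d, hadj, hd⟩
    · exact EReach.boundary c h1 h2 hb
    · exact EReach.step c d h1 h2 hadj (ih d hd)
lemma filt_ext (n m : Int) (p q : Int × Int → Bool)
    (h : ∀ x, x ∈ (cells n m).filter p ↔ x ∈ (cells n m).filter q) :
    (cells n m).filter p = (cells n m).filter q := by
  apply List.filter_congr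
  intro x hx
  have hx' := h x
  simp only [List.mem_filter, hx, true_and] at hx'
  cases hp : p x <;> cases hq : q x <;> simp [hp, hq] at hx' ⊢

lemma iter_succ_eq_of_mem_iff (g : List (List Char)) (n m : Int) (k : Nat)
    (h : ∀ x, x ∈ iterF g n m (k + 1) ↔ x ∈ iterF g n m k) :
    iterF g n m (k + 1) = iterF g n m k := by
  cases k with
  | zero =>
    show iterF g n m 1 = ([] : List (Int × Int))
    rw [List.eq_nil_iff_forall_not_mem]
    intro x hx
    have := (h x).1 hx
    simp [iterF] at this
  | succ j => exact filt_ext n m _ _ h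

lemma stable_propagate (g : List (List Char)) (n m : Int) (k : Nat)
    (h : iterF g n m (k + 1) = iterF g n m k) :
    ∀ j, k ≤ j → iterF g n m j = iterF g n m k := by
  intro j hj
  induction j, hj using Nat.le_induction with
  | base => rfl
  | succ j hj ih =>
    calc iterF g n m (j + 1) = sweep g n m (iterF g n m j) := rfl
    _ = sweep g n m (iterF g n m k) := by rw [ih]
    _ = iterF g n m k := h

lemma iter_stable_or_len (g : List (List Char)) (n m : Int) :
    ∀ k, iterF g n m (k + 1) = iterF g n m k ∨ k ≤ (iterF g n m k).length := by
  intro k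
  induction k with
  | zero => exact Or.inr (Nat.zero_le _)
  | succ k ih =>
    by_cases hst : iterF g n m (k + 1) = iterF g n m k
    · exact Or.inl (by
        calc iterF g n m (k + 2) = sweep g n m (iterF g n m (k + 1)) := rfl
        _ = sweep g n m (iterF g n m k) := by rw [hst]
        _ = iterF g n m (k + 1) := rfl)
    · right
      have hk : k ≤ (iterF g n m k).length := by
        rcases ih with h | h
        · exact absurd h hst
        · exact h
      have hsub : List.Subperm (iterF g n m k) (iterF g n m (k + 1)) :=
        (iter_nodup g n m k).subperm (fun x hx => iter_subset_succ g n m k x hx)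
      have hlt : (iterF g n m k).length < (iterF g n m (k + 1)).length := by
        by_contra hle
        have hperm := hsub.perm_of_length_le (Nat.le_of_not_lt hle)
        exact hst (iter_succ_eq_of_mem_iff g n m k (fun x => hperm.symm.mem_iff))
      omega

lemma iter_stable_N (g : List (List Char)) (n m : Int) :
    iterF g n m (n.toNat * m.toNat + 2) = iterF g n m (n.toNat * m.toNat + 1) := by
  rcases iter_stable_or_len g n m (n.toNat * m.toNat + 1) with h | h
  · exact h
  · exfalso
    have : (iterF g n m (n.toNat * m.toNat + 1)).length ≤ (cells n m).length :=
      List.length_filter_le _ _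
    rw [length_cells] at this
    omega

lemma fixLoop_correct (g : List (List Char)) (n m : Int) :
    ∀ (f k : Nat), iterF g n m (k + f + 1) = iterF g n m (k + f) →
      fixLoop g n m f (iterF g n m k) = iterF g n m (k + f) := by
  intro f
  induction f with
  | zero => intro k _; rfl
  | succ f ih =>
    intro k hst
    show (if sweep g n m (iterF g n m k) = iterF g n m k then iterF g n m k
          else fixLoop g n m f (sweep g n m (iterF g n m k))) = _
    by_cases h : sweep g n m (iterF g n m k) = iterF g n m k
    · rw [if_pos h]
      exact (stable_propagate g n m k h (k + (f + 1)) (by omega)).symm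
    · rw [if_neg h]
      have h2 : iterF g n m ((k + 1) + f + 1) = iterF g n m ((k + 1) + f) := by
        rw [show (k + 1) + f + 1 = k + (f + 1) + 1 from by omega,
          show (k + 1) + f = k + (f + 1) from by omega]
        exact hst
      have h3 := ih (k + 1) h2
      rw [show k + (f + 1) = (k + 1) + f from by omega]
      exact h3
lemma EReach_inB_isE (g : List (List Char)) (n m : Int) (c : Int × Int)
    (h : EReach g n m c) : inB n m c ∧ cellGet g c.1 c.2 = 'e' := by
  cases h with
  | boundary c h1 h2 _ => exact ⟨h1, h2⟩
  | step c d h1 h2 _ _ => exact ⟨h1, h2⟩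

lemma reach_exists (g : List (List Char)) (n m : Int) (c : Int × Int)
    (h : EReach g n m c) : ∃ k, c ∈ iterF g n m k := by
  induction h with
  | boundary c h1 h2 h3 =>
    exact ⟨1, (mem_sweep g n m [] c).2 ⟨h1, h2, Or.inl h3⟩⟩
  | step c d h1 h2 hadj _ ih =>
    obtain ⟨k, hk⟩ := ih
    exact ⟨k + 1, (mem_sweep g n m _ c).2 ⟨h1, h2, Or.inr ⟨d, hadj, hk⟩⟩⟩

lemma open_spec (g : List (List Char)) (n m : Int) (c : Int × Int) :
    c ∈ fixLoop g n m (n.toNat * m.toNat + 2) [] ↔ EReach g n m c := by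
  have hstable := iter_stable_N g n m
  have hprop := stable_propagate g n m (n.toNat * m.toNat + 1) hstable
  have hfix : fixLoop g n m (n.toNat * m.toNat + 2) [] = iterF g n m (n.toNat * m.toNat + 2) := by
    have h3 : iterF g n m (0 + (n.toNat * m.toNat + 2) + 1) = iterF g n m (0 + (n.toNat * m.toNat + 2)) := by
      simp only [Nat.zero_add]
      rw [hprop (n.toNat * m.toNat + 2 + 1) (by omega), hprop (n.toNat * m.toNat + 2) (by omega)]
    have := fixLoop_correct g n m (n.toNat * m.toNat + 2) 0 h3
    simpa using this
  rw [hfix]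
  constructor
  · exact iter_sound g n m _ c
  · intro h
    obtain ⟨k, hk⟩ := reach_exists g n m c h
    rcases Nat.lt_or_ge (n.toNat * m.toNat + 2) k with hgt | hle
    · rw [hprop k (by omega)] at hk
      rw [hprop (n.toNat * m.toNat + 2) (by omega)]
      exact hk
    · exact iter_mono g n m hle c hk

lemma adjc_iff_dir (cur x : Int × Int) :
    adjc cur x ↔ ∃ d ∈ dirList, x = (d.1 + cur.1, d.2 + cur.2) := by
  simp only [dirList, List.mem_cons, List.not_mem_nil, or_false, adjc]
  constructor
  · rintro (rfl | rfl | rfl | rfl)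
    · exact ⟨(-1, 0), by tauto, by simp [Prod.ext_iff]; ring⟩
    · exact ⟨(1, 0), by tauto, by simp [Prod.ext_iff]; ring⟩
    · exact ⟨(0, -1), by tauto, by simp [Prod.ext_iff]; ring⟩
    · exact ⟨(0, 1), by tauto, by simp [Prod.ext_iff]; ring⟩
  · rintro ⟨d, (rfl | rfl | rfl | rfl), rfl⟩
    · right; right; right; simp [Prod.ext_iff]; ring
    · right; right; left; simp [Prod.ext_iff]; ring
    · right; left; simp [Prod.ext_iff]; ring
    · left; simp [Prod.ext_iff]; ring

lemma onB_iff_dir_oob (n m : Int) (cur : Int × Int) (h : inB n m cur) :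
    onB n m cur ↔ ∃ d ∈ dirList,
      d.1 + cur.1 < 0 ∨ d.2 + cur.2 < 0 ∨ n ≤ d.1 + cur.1 ∨ m ≤ d.2 + cur.2 := by
  obtain ⟨h1, h2, h3, h4⟩ := h
  simp only [onB, dirList, List.mem_cons, List.not_mem_nil, or_false]
  constructor
  · rintro (h | h | h | h)
    · exact ⟨(-1, 0), by tauto, by omega⟩
    · exact ⟨(0, -1), by tauto, by omega⟩
    · exact ⟨(1, 0), by tauto, by omega⟩
    · exact ⟨(0, 1), by tauto, by omega⟩
  · rintro ⟨d, (rfl | rfl | rfl | rfl), hd⟩ <;> simp at hd <;> omega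
lemma conn_step_reach (g : List (List Char)) (n m : Int) (s c : Int × Int)
    (hc : Conn g n m s c) :
    ∀ d, adjc c d → inB n m d → cellGet g d.1 d.2 = 'e' → EReach g n m d → ReachB g n m s := by
  induction hc with
  | base => exact fun d hadj hin hise hr => Or.inr ⟨d, hadj, hin, hise, hr⟩
  | step a b _ hadj hin hise ih =>
    intro d hadjb hind hised hrd
    exact ih b hadj hin hise (EReach.step b d hin hise hadjb hrd)

lemma conn_boundary_reach (g : List (List Char)) (n m : Int) (s c : Int × Int)
    (hc : Conn g n m s c) (hcin : inB n m c) (hcb : onB n m c) : ReachB g n m s := by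
  cases hc with
  | base => exact Or.inl hcb
  | step a ha hadj hin hise =>
    rename_i hisE
    exact conn_step_reach g n m s a hadj c hin hise hisE (EReach.boundary c hise hisE hcb)

lemma closed_no_reach (g : List (List Char)) (n m : Int) (V : List (Int × Int))
    (hV : ∀ c ∈ V, ¬ onB n m c ∧
      ∀ d, adjc c d → inB n m d → cellGet g d.1 d.2 = 'e' → d ∈ V) :
    ∀ c, EReach g n m c → c ∈ V → False := by
  intro c h
  induction h with
  | boundary c h1 h2 h3 => exact fun hc => (hV c hc).1 h3
  | step c d h1 h2 hadj hr ih =>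
    intro hc
    obtain ⟨hin, hise⟩ := EReach_inB_isE g n m d hr
    exact ih ((hV c hc).2 d hadj hin hise)
lemma bfsInner_none_onB (g : List (List Char)) (n m : Int) (cur : Int × Int)
    (hcur : inB n m cur) :
    ∀ (ds : List (Int × Int)) (vis q : List (Int × Int)), (∀ d ∈ ds, d ∈ dirList) →
      bfsInner g n m cur ds vis q = none → onB n m cur := by
  intro ds
  induction ds with
  | nil => intro vis q _ h; simp [bfsInner] at h
  | cons d rest ih =>
    intro vis q hds h
    rw [bfsInner] at h
    by_cases hoob : d.1 + cur.1 < 0 ∨ d.2 + cur.2 < 0 ∨ n ≤ d.1 + cur.1 ∨ m ≤ d.2 + cur.2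
    · exact (onB_iff_dir_oob n m cur hcur).2 ⟨d, hds d (by simp), hoob⟩
    · rw [if_neg hoob] at h
      split at h
      · exact ih vis q (fun x hx => hds x (by simp [hx])) h
      · split at h
        · exact ih _ _ (fun x hx => hds x (by simp [hx])) h
        · exact ih _ _ (fun x hx => hds x (by simp [hx])) h

lemma bfsInner_some_spec (g : List (List Char)) (n m : Int) (s cur : Int × Int)
    (_hcur : inB n m cur) (hconn : Conn g n m s cur) :
    ∀ (ds : List (Int × Int)) (vis q v q' : List (Int × Int)),
      (∀ d ∈ ds, d ∈ dirList) →
      (∀ c ∈ vis, inB n m c ∧ Conn g n m s c) → vis.Nodup → q.Nodup → (∀ c ∈ q, c ∈ vis) →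
      bfsInner g n m cur ds vis q = some (v, q') →
      (v.length + q.length = vis.length + q'.length ∧
       (∀ c ∈ vis, c ∈ v) ∧ (∀ c ∈ q, c ∈ q') ∧
       (∀ c ∈ v, inB n m c ∧ Conn g n m s c) ∧ v.Nodup ∧ q'.Nodup ∧ (∀ c ∈ q', c ∈ v) ∧
       (∀ c ∈ q', c ∈ q ∨ c ∉ vis) ∧
       (∀ c ∈ v, c ∈ vis ∨ c ∈ q') ∧
       (∀ d ∈ ds, inB n m (d.1 + cur.1, d.2 + cur.2)) ∧
       (∀ d ∈ ds, cellGet g (d.1 + cur.1) (d.2 + cur.2) = 'e' →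
          (d.1 + cur.1, d.2 + cur.2) ∈ v)) := by
  intro ds
  induction ds with
  | nil =>
    intro vis q v q' _ hvis hnd hqnd hvq h
    rw [bfsInner] at h
    injection h with h
    injection h with h1 h2
    subst h1; subst h2
    refine ⟨rfl, fun c hc => hc, fun c hc => hc, hvis, hnd, hqnd, hvq, ?_, ?_, ?_, ?_⟩
    · exact fun c hc => Or.inl hc
    · exact fun c hc => Or.inl hc
    · intro d hd; simp at hd
    · intro d hd; simp at hd
  | cons d rest ih =>
    intro vis q v q' hds hvis hnd hqnd hvq h
    rw [bfsInner] at h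
    by_cases hoob : d.1 + cur.1 < 0 ∨ d.2 + cur.2 < 0 ∨ n ≤ d.1 + cur.1 ∨ m ≤ d.2 + cur.2
    · rw [if_pos hoob] at h; exact absurd h (by simp)
    · rw [if_neg hoob] at h
      have hinb : inB n m (d.1 + cur.1, d.2 + cur.2) := by
        unfold inB; push Not at hoob; constructor <;> [omega; constructor <;> [omega; constructor <;> omega]]
      have hrest : ∀ x ∈ rest, x ∈ dirList := fun x hx => hds x (by simp [hx])
      have hadj : adjc cur (d.1 + cur.1, d.2 + cur.2) :=
        (adjc_iff_dir cur _).2 ⟨d, hds d (by simp), rfl⟩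
      split at h
      · -- already visited
        rename_i hvisited
        obtain ⟨c1, c2, c3, c4, c5, c6, c7, c8, c9, c10, c11⟩ :=
          ih vis q v q' hrest hvis hnd hqnd hvq h
        refine ⟨c1, c2, c3, c4, c5, c6, c7, c8, c9, ?_, ?_⟩
        · intro x hx
          rcases List.mem_cons.1 hx with rfl | hx
          · exact hinb
          · exact c10 x hx
        · intro x hx _
          rcases List.mem_cons.1 hx with rfl | hx
          · exact c2 _ hvisited
          · exact c11 x hx ‹_›
      · split at h
        · -- new 'e' cell enqueued
          rename_i hnotvis hisE
          have hconn' : Conn g n m s (d.1 + cur.1, d.2 + cur.2) :=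
            Conn.step cur _ hconn hadj hinb hisE
          have hnotq : (d.1 + cur.1, d.2 + cur.2) ∉ q := fun hq => hnotvis (hvq _ hq)
          obtain ⟨c1, c2, c3, c4, c5, c6, c7, c8, c9, c10, c11⟩ :=
            ih ((d.1 + cur.1, d.2 + cur.2) :: vis) (q ++ [(d.1 + cur.1, d.2 + cur.2)]) v q'
              hrest
              (fun c hc => by
                rcases List.mem_cons.1 hc with rfl | hc
                · exact ⟨hinb, hconn'⟩
                · exact hvis c hc)
              (List.nodup_cons.2 ⟨hnotvis, hnd⟩)
              (by
                refine List.Nodup.append hqnd (List.nodup_singleton _) ?_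
                intro x hx hx'
                obtain rfl := List.mem_singleton.1 hx'
                exact hnotq hx)
              (fun c hc => by
                rcases List.mem_append.1 hc with hc | hc
                · exact List.mem_cons_of_mem _ (hvq c hc)
                · obtain rfl := List.mem_singleton.1 hc
                  exact List.mem_cons_self)
              h
          refine ⟨?_, ?_, ?_, c4, c5, c6, c7, ?_, ?_, ?_, ?_⟩
          · simp at c1; omega
          · exact fun c hc => c2 c (List.mem_cons_of_mem _ hc)
          · exact fun c hc => c3 c (List.mem_append_left _ hc)
          · intro c hc
            rcases c8 c hc with hc' | hc'
            · rcases List.mem_append.1 hc' with h' | h'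
              · exact Or.inl h'
              · obtain rfl := List.mem_singleton.1 h'
                exact Or.inr hnotvis
            · exact Or.inr (fun hcv => hc' (List.mem_cons_of_mem _ hcv))
          · intro c hc
            rcases c9 c hc with hc' | hc'
            · rcases List.mem_cons.1 hc' with rfl | h'
              · exact Or.inr (c3 _ (List.mem_append_right _ (by simp)))
              · exact Or.inl h'
            · exact Or.inr hc'
          · intro x hx
            rcases List.mem_cons.1 hx with rfl | hx
            · exact hinb
            · exact c10 x hx
          · intro x hx hxe
            rcases List.mem_cons.1 hx with rfl | hx
            · exact c2 _ List.mem_cons_self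
            · exact c11 x hx hxe
        · -- neighbour not 'e'
          rename_i hnotvis hnotE
          obtain ⟨c1, c2, c3, c4, c5, c6, c7, c8, c9, c10, c11⟩ :=
            ih vis q v q' hrest hvis hnd hqnd hvq h
          refine ⟨c1, c2, c3, c4, c5, c6, c7, c8, c9, ?_, ?_⟩
          · intro x hx
            rcases List.mem_cons.1 hx with rfl | hx
            · exact hinb
            · exact c10 x hx
          · intro x hx hxe
            rcases List.mem_cons.1 hx with rfl | hx
            · exact absurd hxe hnotE
            · exact c11 x hx hxe
lemma bfsLoop_sound (g : List (List Char)) (n m : Int) (s : Int × Int) :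
    ∀ (fuel : Nat) (vis q : List (Int × Int)),
      (∀ c ∈ vis, inB n m c ∧ Conn g n m s c) → vis.Nodup → q.Nodup → (∀ c ∈ q, c ∈ vis) →
      bfsLoop g n m fuel vis q = true → ReachB g n m s := by
  intro fuel
  induction fuel with
  | zero => intro vis q _ _ _ _ h; simp [bfsLoop] at h
  | succ fuel ih =>
    intro vis q hvis hnd hqnd hvq h
    match q, h with
    | cur :: rest, h =>
      rw [bfsLoop] at h
      have hcur := hvis cur (hvq cur List.mem_cons_self)
      rw [if_neg (by obtain ⟨⟨h1, h2, h3, h4⟩, _⟩ := hcur; push Not; omega)] at h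
      cases hinner : bfsInner g n m cur dirList vis rest with
      | none =>
        exact conn_boundary_reach g n m s cur hcur.2 hcur.1
          (bfsInner_none_onB g n m cur hcur.1 dirList vis rest (fun d hd => hd) hinner)
      | some vq =>
        obtain ⟨v, q'⟩ := vq
        rw [hinner] at h
        obtain ⟨c1, c2, c3, c4, c5, c6, c7, c8, c9, c10, c11⟩ :=
          bfsInner_some_spec g n m s cur hcur.1 hcur.2 dirList vis rest v q'
            (fun d hd => hd) hvis hnd (List.Nodup.of_cons hqnd)
            (fun c hc => hvq c (List.mem_cons_of_mem _ hc)) hinner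
        exact ih v q' c4 c5 c6 c7 h

lemma bfsLoop_complete (g : List (List Char)) (n m : Int) (s : Int × Int)
    (hreach : ReachB g n m s) :
    ∀ (fuel : Nat) (vis q : List (Int × Int)),
      (∀ c ∈ vis, inB n m c ∧ Conn g n m s c) → vis.Nodup → q.Nodup → (∀ c ∈ q, c ∈ vis) →
      s ∈ vis →
      (∀ c ∈ vis, c ∉ q → ¬ onB n m c ∧
        ∀ d, adjc c d → inB n m d → cellGet g d.1 d.2 = 'e' → d ∈ vis) →
      q.length + (n.toNat * m.toNat - vis.length) ≤ fuel →
      bfsLoop g n m fuel vis q = true := by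
  intro fuel
  induction fuel with
  | zero =>
    intro vis q hvis hnd hqnd hvq hs hcl hfuel
    -- queue must be empty; then the visited set is closed and boundary-free: contradiction
    match q, hqnd, hvq, hcl, hfuel with
    | [], _, _, hcl, _ =>
      exfalso
      have hcl' : ∀ c ∈ vis, ¬ onB n m c ∧
          ∀ d, adjc c d → inB n m d → cellGet g d.1 d.2 = 'e' → d ∈ vis :=
        fun c hc => hcl c hc (List.not_mem_nil)
      rcases hreach with hb | ⟨d, hadj, hin, hise, hr⟩
      · exact (hcl' s hs).1 hb
      · exact closed_no_reach g n m vis hcl' d hr ((hcl' s hs).2 d hadj hin hise)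
    | cur :: rest, hqnd, hvq, _, hfuel =>
      simp at hfuel
  | succ fuel ih =>
    intro vis q hvis hnd hqnd hvq hs hcl hfuel
    match q, hqnd, hvq, hcl, hfuel with
    | [], _, _, hcl, _ =>
      exfalso
      have hcl' : ∀ c ∈ vis, ¬ onB n m c ∧
          ∀ d, adjc c d → inB n m d → cellGet g d.1 d.2 = 'e' → d ∈ vis :=
        fun c hc => hcl c hc (List.not_mem_nil)
      rcases hreach with hb | ⟨d, hadj, hin, hise, hr⟩
      · exact (hcl' s hs).1 hb
      · exact closed_no_reach g n m vis hcl' d hr ((hcl' s hs).2 d hadj hin hise)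
    | cur :: rest, hqnd, hvq, hcl, hfuel =>
      rw [bfsLoop]
      by_cases hoob : cur.1 < 0 ∨ cur.2 < 0 ∨ n ≤ cur.1 ∨ m ≤ cur.2
      · rw [if_pos hoob]
      · rw [if_neg hoob]
        have hcur := hvis cur (hvq cur List.mem_cons_self)
        cases hinner : bfsInner g n m cur dirList vis rest with
        | none => rfl
        | some vq =>
          obtain ⟨v, q'⟩ := vq
          obtain ⟨c1, c2, c3, c4, c5, c6, c7, c8, c9, c10, c11⟩ :=
            bfsInner_some_spec g n m s cur hcur.1 hcur.2 dirList vis rest v q'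
              (fun d hd => hd) hvis hnd (List.Nodup.of_cons hqnd)
              (fun c hc => hvq c (List.mem_cons_of_mem _ hc)) hinner
          have hcurnotrest : cur ∉ rest := (List.nodup_cons.1 hqnd).1
          have hcurq' : cur ∉ q' := by
            intro hcq
            rcases c8 cur hcq with hc | hc
            · exact hcurnotrest hc
            · exact hc (hvq cur List.mem_cons_self)
          apply ih v q' c4 c5 c6 c7 (c2 s hs)
          · -- closure invariant for the new state
            intro c hcv hcq
            rcases c9 c hcv with hcvis | hcq'
            · by_cases hcq2 : c ∈ (cur :: rest)
              · rcases List.mem_cons.1 hcq2 with rfl | hcrest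
                · -- c = cur, just processed
                  constructor
                  · rw [onB_iff_dir_oob n m c hcur.1]
                    rintro ⟨d, hd, hdo⟩
                    have := c10 d hd
                    unfold inB at this
                    simp at this
                    omega
                  · intro d hadj hin hise
                    obtain ⟨dd, hdd, rfl⟩ := (adjc_iff_dir c d).1 hadj
                    exact c11 dd hdd hise
                · exact absurd (c3 c hcrest) hcq
              · obtain ⟨hnb, hclc⟩ := hcl c hcvis hcq2
                exact ⟨hnb, fun d hadj hin hise => c2 d (hclc d hadj hin hise)⟩
            · exact absurd hcq' hcq
          · -- fuel bound
            have hvlen : v.length ≤ n.toNat * m.toNat :=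
              nodup_inB_length_le n m v c5 (fun c hc => (c4 c hc).1)
            simp at hfuel c1
            omega
lemma bfs_iff (g : List (List Char)) (n m : Int) (x y : Int) (h : inB n m (x, y)) :
    bfs g n m x y = true ↔ ReachB g n m (x, y) := by
  constructor
  · intro hb
    exact bfsLoop_sound g n m (x, y) (n.toNat * m.toNat + 1) [(x, y)] [(x, y)]
      (fun c hc => by obtain rfl := List.mem_singleton.1 hc; exact ⟨h, Conn.base⟩)
      (List.nodup_singleton _) (List.nodup_singleton _) (fun c hc => hc) hb
  · intro hr
    exact bfsLoop_complete g n m (x, y) hr (n.toNat * m.toNat + 1) [(x, y)] [(x, y)]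
      (fun c hc => by obtain rfl := List.mem_singleton.1 hc; exact ⟨h, Conn.base⟩)
      (List.nodup_singleton _) (List.nodup_singleton _) (fun c hc => hc)
      List.mem_cons_self
      (fun c hc hnc => absurd hc hnc)
      (by simp; omega)
lemma onBoundaryOrOpen_iff_reach (g : List (List Char)) (n m : Int) (c : Int × Int) :
    onBoundaryOrOpen n m (fixLoop g n m (n.toNat * m.toNat + 2) []) c.1 c.2 = true ↔
      ReachB g n m c := by
  unfold onBoundaryOrOpen ReachB onB
  simp only [decide_eq_true_eq]
  constructor
  · rintro (h | h | h | h | h | h | h | h)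
    · exact Or.inl (Or.inl h)
    · exact Or.inl (Or.inr (Or.inl h))
    · exact Or.inl (Or.inr (Or.inr (Or.inl h)))
    · exact Or.inl (Or.inr (Or.inr (Or.inr h)))
    all_goals {
      refine Or.inr ⟨_, ?_, ?_, ?_, (open_spec g n m _).1 h⟩
      · unfold adjc; tauto
      · exact (EReach_inB_isE g n m _ ((open_spec g n m _).1 h)).1
      · exact (EReach_inB_isE g n m _ ((open_spec g n m _).1 h)).2 }
  · rintro ((h | h | h | h) | ⟨d, hadj, hin, hise, hr⟩)
    · exact Or.inl h
    · exact Or.inr (Or.inl h)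
    · exact Or.inr (Or.inr (Or.inl h))
    · exact Or.inr (Or.inr (Or.inr (Or.inl h)))
    · have hd := (open_spec g n m d).2 hr
      rcases hadj with rfl | rfl | rfl | rfl
      · exact Or.inr (Or.inr (Or.inr (Or.inr (Or.inl hd))))
      · exact Or.inr (Or.inr (Or.inr (Or.inr (Or.inr (Or.inl hd)))))
      · exact Or.inr (Or.inr (Or.inr (Or.inr (Or.inr (Or.inr (Or.inl hd))))))
      · exact Or.inr (Or.inr (Or.inr (Or.inr (Or.inr (Or.inr (Or.inr hd))))))

lemma forkCollect_fold (g : List (List Char)) (n m : Int) (t : Char) :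
    ∀ (L : List (Int × Int)) (acc : List (Int × Int)), (∀ c ∈ L, inB n m c) →
      L.foldl (fun acc c =>
        if cellGet g c.1 c.2 = 'e' then acc
        else if t = cellGet g c.1 c.2 then
          (if bfs g n m c.1 c.2 then acc ++ [c] else acc)
        else acc) acc =
      acc ++ L.filter (fun c =>
        cellGet g c.1 c.2 == t && t != 'e' &&
          onBoundaryOrOpen n m (fixLoop g n m (n.toNat * m.toNat + 2) []) c.1 c.2) := by
  intro L
  induction L with
  | nil => intro acc _; simp
  | cons c L ih =>
    intro acc hb
    have hc : inB n m c := hb c List.mem_cons_self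
    have hrest : ∀ x ∈ L, inB n m x := fun x hx => hb x (List.mem_cons_of_mem _ hx)
    rw [List.foldl_cons, List.filter_cons]
    have hstep : (if cellGet g c.1 c.2 = 'e' then acc
        else if t = cellGet g c.1 c.2 then
          (if bfs g n m c.1 c.2 then acc ++ [c] else acc)
        else acc) =
        (if (cellGet g c.1 c.2 == t && t != 'e' &&
          onBoundaryOrOpen n m (fixLoop g n m (n.toNat * m.toNat + 2) []) c.1 c.2) = true
         then acc ++ [c] else acc) := by
      by_cases h1 : cellGet g c.1 c.2 = 'e'
      · rw [if_pos h1, if_neg]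
        simp only [Bool.and_eq_true, beq_iff_eq, bne_iff_ne, ne_eq]
        rintro ⟨⟨h2, h3⟩, _⟩
        exact h3 (h2 ▸ h1)
      · rw [if_neg h1]
        by_cases h2 : t = cellGet g c.1 c.2
        · have hbfs : bfs g n m c.1 c.2 = true ↔
              onBoundaryOrOpen n m (fixLoop g n m (n.toNat * m.toNat + 2) []) c.1 c.2 = true := by
            rw [onBoundaryOrOpen_iff_reach]
            obtain ⟨x, y⟩ := c
            exact bfs_iff g n m x y hc
          rw [if_pos h2]
          by_cases h3 : bfs g n m c.1 c.2 = true
          · rw [if_pos h3, if_pos]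
            simp only [Bool.and_eq_true, beq_iff_eq, bne_iff_ne, ne_eq]
            exact ⟨⟨h2.symm, fun ht => h1 (ht ▸ h2.symm ▸ rfl)⟩, hbfs.1 h3⟩
          · rw [if_neg h3, if_neg]
            simp only [Bool.and_eq_true, beq_iff_eq, bne_iff_ne, ne_eq]
            rintro ⟨_, h4⟩
            exact h3 (hbfs.2 h4)
        · rw [if_neg h2, if_neg]
          simp only [Bool.and_eq_true, beq_iff_eq, bne_iff_ne, ne_eq]
          rintro ⟨⟨h3, _⟩, _⟩
          exact h2 h3.symm
    rw [hstep]
    by_cases hp : (cellGet g c.1 c.2 == t && t != 'e' &&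
        onBoundaryOrOpen n m (fixLoop g n m (n.toNat * m.toNat + 2) []) c.1 c.2) = true
    · rw [if_pos hp, if_pos hp, ih _ hrest]; simp
    · rw [if_neg hp, if_neg (by simpa using hp), ih _ hrest]

lemma forkCollect_eq (g : List (List Char)) (n m : Int) (t : Char) :
    forkCollect g n m t = (cells n m).filter (fun c =>
      cellGet g c.1 c.2 == t && t != 'e' &&
        onBoundaryOrOpen n m (fixLoop g n m (n.toNat * m.toNat + 2) []) c.1 c.2) := by
  unfold forkCollect
  rw [forkCollect_fold g n m t (cells n m) [] (fun c hc => (mem_cells n m c).1 hc)]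
  rfl
lemma applyFold :
    ∀ (L : List (Int × Int)) (g : List (List Char)) (a : Int),
      L.foldl (fun s c => (cellSet s.1 c.1 c.2 'e', s.2 + 1)) (g, a) =
        (L.foldl (fun h c => cellSet h c.1 c.2 'e') g, a + L.length) := by
  intro L
  induction L with
  | nil => intro g a; simp
  | cons c L ih =>
    intro g a
    rw [List.foldl_cons, List.foldl_cons, ih]
    simp only [List.length_cons]
    rw [Prod.mk.injEq]; exact ⟨rfl, by push_cast; ring⟩

lemma craneFold (n m : Int) (t : Char) :
    ∀ (L : List (Int × Int)) (g : List (List Char)) (a : Int),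
      L.Nodup → (∀ c ∈ L, inB n m c) →
      L.foldl (craneStep t) (g, a) =
        ((L.filter (fun c => cellGet g c.1 c.2 == t && t != 'e')).foldl
            (fun h c => cellSet h c.1 c.2 'e') g,
         a + (L.filter (fun c => cellGet g c.1 c.2 == t && t != 'e')).length) := by
  intro L
  induction L with
  | nil => intro g a _ _; simp
  | cons c L ih =>
    intro g a hnd hb
    have hc : inB n m c := hb c List.mem_cons_self
    have hrest : ∀ x ∈ L, inB n m x := fun x hx => hb x (List.mem_cons_of_mem _ hx)
    have hcnot : c ∉ L := (List.nodup_cons.1 hnd).1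
    rw [List.foldl_cons, List.filter_cons]
    by_cases hp : (cellGet g c.1 c.2 == t && t != 'e') = true
    · -- removed cell
      have he : cellGet g c.1 c.2 ≠ 'e' := by
        simp only [Bool.and_eq_true, beq_iff_eq, bne_iff_ne, ne_eq] at hp
        rw [hp.1]; exact hp.2
      have ht : t = cellGet g c.1 c.2 := by
        simp only [Bool.and_eq_true, beq_iff_eq] at hp
        exact hp.1.symm
      have hstep : craneStep t (g, a) c = (cellSet g c.1 c.2 'e', a + 1) := by
        unfold craneStep
        rw [if_neg he, if_pos ht]
      rw [hstep, if_pos hp, ih _ _ (List.Nodup.of_cons hnd) hrest]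
      have hfilt : L.filter (fun x => cellGet (cellSet g c.1 c.2 'e') x.1 x.2 == t && t != 'e') =
          L.filter (fun x => cellGet g x.1 x.2 == t && t != 'e') := by
        apply List.filter_congr
        intro x hx
        rw [cellGet_cellSet_ne g c x 'e' ⟨hc.1, hc.2.2.1⟩ ⟨(hrest x hx).1, (hrest x hx).2.2.1⟩
          (fun hcx => hcnot (hcx ▸ hx))]
      rw [hfilt, List.foldl_cons]
      simp only [List.length_cons]
      rw [Prod.mk.injEq]; exact ⟨rfl, by push_cast; ring⟩
    · -- skipped cell
      have hstep : craneStep t (g, a) c = (g, a) := by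
        unfold craneStep
        by_cases h1 : cellGet g c.1 c.2 = 'e'
        · rw [if_pos h1]
        · rw [if_neg h1]
          rw [if_neg]
          intro h2
          apply hp
          simp only [Bool.and_eq_true, beq_iff_eq, bne_iff_ne, ne_eq]
          exact ⟨h2.symm, fun ht => h1 (ht ▸ h2.symm ▸ rfl)⟩
      rw [hstep, if_neg (by simpa using hp), ih _ _ (List.Nodup.of_cons hnd) hrest]

lemma reqStep_eq (n m : Int) (s : List (List Char) × Int) (r : String) :
    reqStepA n m s r = reqStepB n m s r := by
  obtain ⟨g, a⟩ := s
  unfold reqStepA reqStepB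
  by_cases hlen : PySem.Str.len r = 2
  · simp only [if_pos hlen]
    exact craneFold n m _ (cells n m) g a (nodup_cells n m)
      (fun c hc => (mem_cells n m c).1 hc)
  · simp only [if_neg hlen]
    rw [forkCollect_eq, applyFold]

-- ===== VERDICT (by name: the statement is the Claim_ definition above) =====
theorem solution_spec : Claim_equal_solution := by
  intro storage requests _ _
  unfold Spec_solution solution solution_alt
  show PySem.List.len storage * PySem.Str.len ((PySem.List.pyGet? storage 0).getD "") -
      (requests.foldl (reqStepA (PySem.List.len storage)
        (PySem.Str.len ((PySem.List.pyGet? storage 0).getD "")))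
        (storage.map String.toList, 0)).2 =
    PySem.List.len storage * PySem.Str.len ((PySem.List.pyGet? storage 0).getD "") -
      (requests.foldl (reqStepB (PySem.List.len storage)
        (PySem.Str.len ((PySem.List.pyGet? storage 0).getD "")))
        (storage.map String.toList, 0)).2
  have h : reqStepA (PySem.List.len storage)
        (PySem.Str.len ((PySem.List.pyGet? storage 0).getD "")) =
      reqStepB (PySem.List.len storage)
        (PySem.Str.len ((PySem.List.pyGet? storage 0).getD "")) :=
    funext fun s => funext fun r => reqStep_eq _ _ s r
  rw [h]
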